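-- pv_equiv track=rewrite | github.com/wvlt/youtube-topic-researcher | src/youtube/competitor.py | _find_common_themes
-- ===== SOURCE A (Python) =====
-- from typing import List, Dict, Optional
--
-- def _find_common_themes(competitors: List[dict]) -> List[str]:
--     """Find common themes across competitors"""
--     all_themes = []
--
--     for competitor in competitors:
--         all_themes.extend(competitor.get('content_themes', []))
--
--     # Count theme frequency
--     theme_freq = {}
--     for theme in all_themes:
--         theme_freq[theme] = theme_freq.get(theme, 0) + 1
--
--     # Return themes appearing in multiple competitors
--     common = [theme for theme, count in theme_freq.items() if count > 1]
--     return sorted(common, key=lambda x: theme_freq[x], reverse=True)[:10]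
-- ===== SOURCE B (Python) =====
-- def _find_common_themes(competitors):
--     """Find common themes across competitors (bucket ranking instead of a comparison sort)."""
--     freq = {}
--     for competitor in competitors:
--         for theme in competitor.get('content_themes', []):
--             freq[theme] = freq.get(theme, 0) + 1
--
--     buckets = {}
--     for theme, count in freq.items():
--         if count > 1:
--             buckets.setdefault(count, []).append(theme)
--
--     result = []
--     for count in range(max(buckets, default=1), 1, -1):
--         result += buckets.get(count, [])
--     return result[:10]
-- ===== Notes on version B (the rewrite author's own statement) =====
-- stated objective: alternative
-- what changed: Counts in a single fused pass (no intermediate all_themes list) and replaces the stable comparison sort by a count->themes bucket map walked from the maximum count down to 2, preserving first-appearance tie order.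
import Mathlib
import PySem

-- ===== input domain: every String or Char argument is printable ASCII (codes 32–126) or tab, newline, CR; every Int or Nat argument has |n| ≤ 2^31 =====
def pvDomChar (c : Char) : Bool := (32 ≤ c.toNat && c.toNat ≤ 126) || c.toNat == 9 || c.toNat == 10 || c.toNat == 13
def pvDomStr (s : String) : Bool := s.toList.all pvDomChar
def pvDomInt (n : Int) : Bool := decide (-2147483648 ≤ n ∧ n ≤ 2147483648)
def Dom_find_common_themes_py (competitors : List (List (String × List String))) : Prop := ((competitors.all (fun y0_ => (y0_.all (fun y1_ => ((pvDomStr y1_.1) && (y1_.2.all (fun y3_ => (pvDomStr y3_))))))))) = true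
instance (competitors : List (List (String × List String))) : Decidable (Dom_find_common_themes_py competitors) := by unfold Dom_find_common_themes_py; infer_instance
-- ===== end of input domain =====

-- B replaces A's build-list + stable sort by a fused counting pass and a count→themes bucket map
-- walked from the maximum count down to 2 (same output, alternative algorithm).

-- ===== PORT A =====
def find_common_themes_py (competitors : List (List (String × List String))) : List String :=
  let all_themes : List String :=
    competitors.foldl (fun acc competitor => acc ++ (PySem.Dict.mk competitor).getD "content_themes" []) []
  let theme_freq : PySem.Dict String Int :=
    all_themes.foldl (fun d theme => d.insert theme (d.getD theme 0 + 1)) PySem.Dict.empty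
  let common : List String := (theme_freq.items.filter (fun p => decide (p.2 > 1))).map (fun p => p.1)
  -- theme_freq[x]: every x in common is a key of theme_freq, so getD with default 0 is exact here
  (PySem.List.sorted common (fun x => theme_freq.getD x 0) true).take 10  -- [:10] on a list = take 10

-- ===== PORT B =====
def find_common_themes_py_alt (competitors : List (List (String × List String))) : List String :=
  let freq : PySem.Dict String Int :=
    competitors.foldl (fun d competitor =>
      ((PySem.Dict.mk competitor).getD "content_themes" []).foldl
        (fun d theme => d.insert theme (d.getD theme 0 + 1)) d) PySem.Dict.empty
  let buckets : PySem.Dict Int (List String) :=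
    freq.items.foldl
      (fun b p => if decide (p.2 > 1) then b.modify p.2 [] (fun l => l ++ [p.1]) else b)
      PySem.Dict.empty
  -- max(buckets, default=1): maximum key of the dict (iteration over keys)
  let top : Int :=
    match PySem.List.max? buckets.keys (fun k => k) with
    | some m => m
    | none => 1
  let result : List String :=
    (PySem.List.pyRange top 1 (-1)).foldl (fun acc c => acc ++ buckets.getD c []) []
  result.take 10  -- [:10]

-- ===== PRECONDITION & SPEC =====
def Spec_find_common_themes_py (competitors : List (List (String × List String))) (out : List String) : Prop := out = find_common_themes_py_alt competitors
instance (competitors : List (List (String × List String))) (out : List String) : Decidable (Spec_find_common_themes_py competitors out) := by unfold Spec_find_common_themes_py; infer_instance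

-- ===== CLAIM (what is proved, stated in full; the proofs are below) =====
def Claim_equal_find_common_themes_py : Prop := ∀ (competitors : List (List (String × List String))), Dom_find_common_themes_py competitors → Spec_find_common_themes_py competitors (find_common_themes_py competitors)

-- ===== LEMMAS AND PROOFS =====

-- folding a step over a flattened list = folding the inner lists one after another
theorem pv_foldl_flatMap {A B S : Type} (g : A → List B) (F : S → B → S) :
    ∀ (ls : List A) (d : S),
      List.foldl (fun d c => (g c).foldl F d) d ls = ((ls.flatMap g).foldl F d) := by
  intro ls
  induction ls with
  | nil => intro d; simp
  | cons a t ih => intro d; simp [List.foldl_append, ih]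

theorem pv_flatMap_congr {A B : Type} (l : List A) (f g : A → List B)
    (h : ∀ a ∈ l, f a = g a) : l.flatMap f = l.flatMap g := by
  induction l with
  | nil => rfl
  | cons a t ih =>
    simp only [List.flatMap_cons]
    rw [h a (by simp), ih (fun a ha => h a (by simp [ha]))]

theorem pv_insertBy_append_left {A : Type} (before : A → A → Bool) (x : A) :
    ∀ (as bs : List A), (∀ y ∈ as, before x y = false) →
      PySem.List.insertBy before x (as ++ bs) = as ++ PySem.List.insertBy before x bs := by
  intro as
  induction as with
  | nil => intro bs _; rfl
  | cons a t ih =>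
    intro bs h
    have ha : before x a = false := h a (by simp)
    simp [PySem.List.insertBy, ha, ih bs (fun y hy => h y (by simp [hy]))]

theorem pv_insertBy_cons_of_all {A : Type} (before : A → A → Bool) (x : A) (bs : List A)
    (h : ∀ y ∈ bs, before x y = true) :
    PySem.List.insertBy before x bs = x :: bs := by
  cases bs with
  | nil => rfl
  | cons b t => simp [PySem.List.insertBy, h b (by simp)]

-- inserting x (reverse=True rule) into a strictly-descending bucket concatenation appends x
-- at the end of its own bucket
theorem pv_insertBy_buckets {A : Type} (key : A → Int) (x : A) (xs : List A) :
    ∀ (vs : List Int), vs.Pairwise (· > ·) → key x ∈ vs →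
      PySem.List.insertBy (fun a b => decide (key b < key a)) x
          (vs.flatMap (fun v => xs.filter (fun t => key t == v)))
        = vs.flatMap (fun v => xs.filter (fun t => key t == v)
            ++ if key x == v then [x] else []) := by
  intro vs
  induction vs with
  | nil => intro _ hx; simp at hx
  | cons v t ih =>
    intro hp hx
    have hall : ∀ u ∈ t, v > u := (List.pairwise_cons.mp hp).1
    have hpt : t.Pairwise (· > ·) := (List.pairwise_cons.mp hp).2
    simp only [List.flatMap_cons]
    by_cases hv : key x = v
    · -- x belongs to the first bucket: pass it, then cons before the (strictly smaller) rest
      rw [pv_insertBy_append_left _ _ _ _ (by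
        intro y hy
        have : key y = v := by simpa using (List.of_mem_filter hy)
        simp [this, hv])]
      rw [pv_insertBy_cons_of_all _ _ _ (by
        intro y hy
        simp only [List.mem_flatMap] at hy
        obtain ⟨u, hu, hyu⟩ := hy
        have : key y = u := by simpa using (List.of_mem_filter hyu)
        have : key y < key x := by rw [this, hv]; exact hall u hu
        simpa using this)]
      have ht : t.flatMap (fun u => xs.filter (fun s => key s == u)
            ++ if key x == u then [x] else [])
          = t.flatMap (fun u => xs.filter (fun s => key s == u)) := by
        apply pv_flatMap_congr
        intro u hu
        have : key x ≠ u := by rw [hv]; exact ne_of_gt (hall u hu)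
        simp [this]
      rw [ht]
      simp [hv]
    · -- x belongs to a later bucket: pass the first bucket and recurse
      have hxt : key x ∈ t := by
        rcases List.mem_cons.mp hx with h | h
        · exact absurd h hv
        · exact h
      have hlt : key x < v := hall _ hxt
      rw [pv_insertBy_append_left _ _ _ _ (by
        intro y hy
        have : key y = v := by simpa using (List.of_mem_filter hy)
        simp [this]
        omega)]
      rw [ih hpt hxt]
      have : (key x == v) = false := by simp [hv]
      simp [this]

-- the stable reverse sort by an Int key IS the bucket concatenation over any strictly
-- descending list of values covering all keys
theorem pv_sorted_rev_eq_buckets {A : Type} (key : A → Int) :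
    ∀ (xs : List A) (vs : List Int), vs.Pairwise (· > ·) → (∀ x ∈ xs, key x ∈ vs) →
      PySem.List.sorted xs key true = vs.flatMap (fun v => xs.filter (fun t => key t == v)) := by
  intro xs
  induction xs using List.reverseRecOn with
  | nil => intro vs _ _; simp [PySem.List.sorted_rev_eq_foldl_insertBy]
  | append_singleton xs x ih =>
    intro vs hp hmem
    rw [PySem.List.sorted_rev_eq_foldl_insertBy, List.foldl_append,
        ← PySem.List.sorted_rev_eq_foldl_insertBy,
        ih vs hp (fun y hy => hmem y (by simp [hy]))]
    simp only [List.foldl_cons, List.foldl_nil]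
    rw [pv_insertBy_buckets key x xs vs hp (hmem x (by simp))]
    apply pv_flatMap_congr
    intro v _
    simp only [List.filter_append]
    by_cases h : key x = v
    · simp [List.filter, h]
    · cases hbe : (key x == v) with
      | true => exact absurd (by simpa using hbe) h
      | false => simp [List.filter, hbe]

-- the folding step of max(…) on Int with the identity key
def pvMaxStep (acc : Option Int) (x : Int) : Option Int :=
  match acc with
  | none => some x
  | some m => if m < x then some x else some m

theorem pv_max?_eq (l : List Int) :
    PySem.List.max? l (fun k : Int => k) = List.foldl pvMaxStep none l := by
  unfold PySem.List.max?
  congr 1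
  funext acc x
  cases acc <;> rfl

-- PySem.List.max? with the identity key on Int: the result bounds every element and is an element
theorem pv_max?_spec :
    ∀ (l : List Int) (acc : Option Int) (m : Int),
      List.foldl pvMaxStep acc l = some m →
      (∀ x ∈ l, x ≤ m) ∧ (∀ a, acc = some a → a ≤ m) := by
  intro l
  induction l with
  | nil =>
    intro acc m h
    constructor
    · intro x hx; simp at hx
    · intro a ha; simp [ha] at h; omega
  | cons x t ih =>
    intro acc m h
    simp only [List.foldl_cons, pvMaxStep] at h
    cases acc with
    | none =>
      have := ih (some x) m h
      refine ⟨?_, ?_⟩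
      · intro y hy
        rcases List.mem_cons.mp hy with rfl | hy
        · exact this.2 y rfl
        · exact this.1 y hy
      · intro a ha; simp at ha
    | some b =>
      by_cases hb : b < x
      · simp only [if_pos hb] at h
        have := ih (some x) m h
        refine ⟨?_, ?_⟩
        · intro y hy
          rcases List.mem_cons.mp hy with rfl | hy
          · exact this.2 y rfl
          · exact this.1 y hy
        · intro a ha
          have hx := this.2 x rfl
          have hab : b = a := by simpa using ha
          omega
      · simp only [if_neg hb] at h
        have := ih (some b) m h
        refine ⟨?_, ?_⟩
        · intro y hy
          rcases List.mem_cons.mp hy with rfl | hy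
          · have := this.2 b rfl; omega
          · exact this.1 y hy
        · exact this.2
  
theorem pv_max?_mem :
    ∀ (l : List Int) (acc : Option Int) (m : Int),
      List.foldl pvMaxStep acc l = some m →
      m ∈ l ∨ acc = some m := by
  intro l
  induction l with
  | nil => intro acc m h; right; simpa using h
  | cons x t ih =>
    intro acc m h
    simp only [List.foldl_cons, pvMaxStep] at h
    cases acc with
    | none =>
      rcases ih (some x) m h with hm | hm
      · exact Or.inl (by simp [hm])
      · exact Or.inl (by simp at hm; simp [hm])
    | some b =>
      by_cases hb : b < x
      · simp only [if_pos hb] at h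
        rcases ih (some x) m h with hm | hm
        · exact Or.inl (by simp [hm])
        · exact Or.inl (by simp at hm; simp [hm])
      · simp only [if_neg hb] at h
        rcases ih (some b) m h with hm | hm
        · exact Or.inl (by simp [hm])
        · exact Or.inr hm

-- the descending range [top, …, 2] is strictly descending
theorem pv_pyRange_pairwise_gt (a b : Int) : (PySem.List.pyRange a b (-1)).Pairwise (· > ·) := by
  rw [PySem.List.pyRange_neg_one]
  refine List.Pairwise.map _ (fun i j (h : i < j) => by omega) ?_
  exact List.pairwise_lt_range

-- the `none` accumulator of max? turns `some` on the first element and stays `some`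
theorem pv_max?_some :
    ∀ (l : List Int) (b : Int),
      List.foldl pvMaxStep (some b) l ≠ none := by
  intro l
  induction l with
  | nil => intro b h; simp at h
  | cons x t ih =>
    intro b h
    simp only [List.foldl_cons, pvMaxStep] at h
    by_cases hb : b < x
    · exact ih x (by simpa [hb] using h)
    · exact ih b (by simpa [hb] using h)

-- the two counting loops build the same frequency dict (Counter of the flattened theme list)
theorem pv_freq_eq (competitors : List (List (String × List String))) :
    List.foldl (fun d c =>
        ((PySem.Dict.mk c).getD "content_themes" []).foldl
          (fun d theme => d.insert theme (d.getD theme 0 + 1)) d) PySem.Dict.empty competitors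
      = PySem.Dict.counter
          (competitors.flatMap (fun c => (PySem.Dict.mk c).getD "content_themes" [])) := by
  rw [pv_foldl_flatMap]
  exact PySem.Dict.foldl_insert_getD_add_one_eq_counter _

theorem pv_main (competitors : List (List (String × List String))) :
    find_common_themes_py competitors = find_common_themes_py_alt competitors := by
  unfold find_common_themes_py find_common_themes_py_alt
  dsimp only
  -- the flattened theme list, its counter, and the common themes with their counts
  set ts : List String :=
    competitors.flatMap (fun c => (PySem.Dict.mk c).getD "content_themes" []) with hts
  have hflat : competitors.foldl
      (fun acc c => acc ++ (PySem.Dict.mk c).getD "content_themes" []) [] = ts := by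
    simpa using PySem.List.foldl_append_eq_flatMap
      (fun c => (PySem.Dict.mk c).getD "content_themes" []) competitors []
  rw [hflat, PySem.Dict.foldl_insert_getD_add_one_eq_counter, pv_freq_eq, ← hts]
  set key : String → Int := fun t => ((ts.count t : Int)) with hkey
  set C : List String := (PySem.Set.ofList ts).filter (fun k => decide (key k > 1)) with hC
  have hitems : ((PySem.Dict.counter ts).items.filter (fun p => decide (p.2 > 1)))
      = C.map (fun k => (k, key k)) := by
    rw [PySem.Dict.items_counter, List.filter_map]
    rfl
  -- A's `common` list
  have hcommon : (((PySem.Dict.counter ts).items.filter (fun p => decide (p.2 > 1))).map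
      (fun p => p.1)) = C := by
    rw [hitems, List.map_map]
    simp [Function.comp_def]
  rw [hcommon]
  have hkeyf : (fun x => (PySem.Dict.counter ts).getD x 0) = key := by
    funext x
    rw [PySem.Dict.getD_counter]
  rw [hkeyf]
  -- B's bucket dict: fold over the filtered items only
  rw [show (fun (b : PySem.Dict Int (List String)) (p : String × Int) =>
        if decide (p.2 > 1) then b.modify p.2 [] (fun l => l ++ [p.1]) else b)
      = (fun b p => if decide (p.2 > 1) = true
          then (fun (b : PySem.Dict Int (List String)) (p : String × Int) =>
            b.modify p.2 [] (fun l => l ++ [p.1])) b p else b) from rfl,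
    ← List.foldl_filter, hitems, List.foldl_map]
  set buckets : PySem.Dict Int (List String) :=
    C.foldl (fun b k => b.modify (key k) [] (fun l => l ++ [k])) PySem.Dict.empty with hbk
  have hgetD : ∀ c : Int, buckets.getD c [] = C.filter (fun t => key t == c) := by
    intro c
    have := PySem.Dict.getD_foldl_modify_append (C.map (fun k => (key k, k)))
      (PySem.Dict.empty : PySem.Dict Int (List String)) c
    rw [List.foldl_map] at this
    rw [hbk, this, List.filter_map, List.map_map]
    simp [Function.comp_def]
  have hkeys : buckets.keys = PySem.Set.ofList (C.map key) := by
    rw [hbk, PySem.Dict.keys_foldl_modify_key C key [] (fun _ k => fun l => l ++ [k])]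
    simp [PySem.Dict.keys_empty, PySem.Set.update, PySem.Set.ofList, List.foldl_map]
  cases hCn : C with
  | nil =>
    -- no common theme: both sides are empty
    have hk0 : buckets.keys = [] := by rw [hkeys, hCn]; rfl
    have hs : PySem.List.sorted ([] : List String) key true = [] := by
      rw [PySem.List.sorted_rev_eq_foldl_insertBy]
      rfl
    have hnone : PySem.List.max? buckets.keys (fun k => k) = none := by
      rw [hk0]; rfl
    rw [hs, hnone]
    simp [PySem.List.pyRange_neg_one_eq_nil (by omega : (1:Int) ≤ 1)]
  | cons t0 rest =>
    rw [← hCn]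
    -- the maximum count
    rcases hm : PySem.List.max? buckets.keys (fun k => k) with _ | m <;>
      rw [pv_max?_eq] at hm
    · -- impossible: buckets.keys is nonempty
      exfalso
      have hne : key t0 ∈ buckets.keys := by
        rw [hkeys, PySem.Set.mem_ofList]
        exact List.mem_map_of_mem (by rw [hCn]; simp)
      rcases hk : buckets.keys with _ | ⟨a, l⟩
      · rw [hk] at hne; simp at hne
      · have hne2 : List.foldl pvMaxStep none buckets.keys ≠ none := by
          rw [hk]
          simp only [List.foldl_cons, pvMaxStep]
          exact pv_max?_some l a
        exact hne2 hm
    · -- max = m : every common theme's count lies in (1, m]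
      have hspec := pv_max?_spec buckets.keys none m hm
      have hmem := pv_max?_mem buckets.keys none m hm
      have hm2 : 2 ≤ m := by
        rcases hmem with hm' | hm'
        · rw [hkeys, PySem.Set.mem_ofList] at hm'
          rcases List.mem_map.mp hm' with ⟨t, ht, hkt⟩
          rw [hC] at ht
          have := List.of_mem_filter ht
          simp at this
          omega
        · simp at hm'
      have hcover : ∀ t ∈ C, key t ∈ PySem.List.pyRange m 1 (-1) := by
        intro t ht
        rw [PySem.List.mem_pyRange_neg_one]
        have h1 : 1 < key t := by
          rw [hC] at ht
          have := List.of_mem_filter ht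
          simpa using this
        have h2 : key t ≤ m := by
          apply hspec.1
          rw [hkeys, PySem.Set.mem_ofList]
          exact List.mem_map_of_mem ht
        exact ⟨h1, h2⟩
      rw [pv_sorted_rev_eq_buckets key C (PySem.List.pyRange m 1 (-1))
        (pv_pyRange_pairwise_gt m 1) hcover]
      rw [PySem.List.foldl_append_eq_flatMap]
      simp only [hgetD, List.nil_append]

-- ===== VERDICT (by name: the statement is the Claim_ definition above) =====
theorem find_common_themes_py_spec : Claim_equal_find_common_themes_py := by
  intro competitors _
  exact pv_main competitors
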